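-- pv_equiv track=rewrite | github.com/hiddensev/CS5446Project-C1Terminal | python-algo/algo_strategy.py | game_pos_map
-- ===== SOURCE A (Python) =====
-- def game_pos_map(x, y):
--     count = 28
--     res = 0
--     if x >= 14:
--         while x > 14:
--             res += count
--             count -= 2
--             x -= 1
--         res += y - (28 - count) // 2 + 213
--     else:
--         while x < 13:
--             res += count
--             x += 1
--             count -= 2
--         res += y - (28 - count) // 2
--     return res
-- ===== SOURCE B (Python) =====
-- def game_pos_map(x, y):
--     if x >= 14:
--         n = x - 14
--         return n * (28 - n) + y + 213
--     n = 13 - x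
--     return n * (28 - n) + y
-- ===== Notes on version B (the rewrite author's own statement) =====
-- stated objective: simpler
-- what changed: Both while-loops and the running count/res accumulators are replaced by the closed-form polynomial n*(28-n)+y (+213 on the x>=14 side), with n the loop's iteration count.
import Mathlib
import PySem

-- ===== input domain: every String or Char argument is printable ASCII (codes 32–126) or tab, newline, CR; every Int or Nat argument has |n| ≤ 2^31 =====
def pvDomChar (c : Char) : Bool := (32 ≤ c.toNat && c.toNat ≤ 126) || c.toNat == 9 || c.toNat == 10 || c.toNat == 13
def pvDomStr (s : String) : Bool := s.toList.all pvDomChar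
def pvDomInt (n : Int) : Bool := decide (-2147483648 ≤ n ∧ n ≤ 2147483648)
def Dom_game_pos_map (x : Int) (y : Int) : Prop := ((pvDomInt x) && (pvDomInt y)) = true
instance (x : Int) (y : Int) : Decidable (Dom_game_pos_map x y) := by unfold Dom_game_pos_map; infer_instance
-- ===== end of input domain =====

-- B replaces A's two counting while-loops by the closed-form polynomial n*(28-n)+y (simpler, O(1)).

-- ===== PORT A =====
-- while x > 14: res += count; count -= 2; x -= 1
def gpmLoopHigh (x count res : Int) : Int × Int :=
  if x > 14 then gpmLoopHigh (x - 1) (count - 2) (res + count) else (count, res)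
termination_by (x - 14).toNat
decreasing_by omega

-- while x < 13: res += count; x += 1; count -= 2
def gpmLoopLow (x count res : Int) : Int × Int :=
  if x < 13 then gpmLoopLow (x + 1) (count - 2) (res + count) else (count, res)
termination_by (13 - x).toNat
decreasing_by omega

def game_pos_map (x : Int) (y : Int) : Int :=
  if x ≥ 14 then
    (gpmLoopHigh x 28 0).2 + (y - PySem.Int.floordiv (28 - (gpmLoopHigh x 28 0).1) 2 + 213)
  else
    (gpmLoopLow x 28 0).2 + (y - PySem.Int.floordiv (28 - (gpmLoopLow x 28 0).1) 2)

-- ===== PORT B =====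
def game_pos_map_alt (x : Int) (y : Int) : Int :=
  if x ≥ 14 then
    (x - 14) * (28 - (x - 14)) + y + 213
  else
    (13 - x) * (28 - (13 - x)) + y

-- ===== PRECONDITION & SPEC =====
def Spec_game_pos_map (x : Int) (y : Int) (out : Int) : Prop := out = game_pos_map_alt x y
instance (x : Int) (y : Int) (out : Int) : Decidable (Spec_game_pos_map x y out) := by unfold Spec_game_pos_map; infer_instance

-- ===== CLAIM (what is proved, stated in full; the proofs are below) =====
def Claim_equal_game_pos_map : Prop := ∀ (x : Int) (y : Int), Dom_game_pos_map x y → Spec_game_pos_map x y (game_pos_map x y)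

-- ===== LEMMAS AND PROOFS =====

-- ===== VERDICT (by name: the statement is the Claim_ definition above) =====
-- loop characterisations: n iterations, each adding the current count and stepping it by -2
theorem gpmLoopHigh_eq (x count res : Int) (h : 14 ≤ x) :
    gpmLoopHigh x count res =
      (count - 2 * (x - 14), res + (x - 14) * count - (x - 14) * (x - 15)) := by
  generalize hn : (x - 14).toNat = n
  induction n generalizing x count res with
  | zero => unfold gpmLoopHigh; rw [if_neg (by omega)]; have : x = 14 := by omega
            subst this; simp only [Prod.mk.injEq]; constructor <;> ring
  | succ k ih =>
      unfold gpmLoopHigh; rw [if_pos (by omega)]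
      rw [ih (x - 1) _ _ (by omega) (by omega)]
      simp only [Prod.mk.injEq]; constructor <;> ring

theorem gpmLoopLow_eq (x count res : Int) (h : x ≤ 13) :
    gpmLoopLow x count res =
      (count - 2 * (13 - x), res + (13 - x) * count - (13 - x) * (12 - x)) := by
  generalize hn : (13 - x).toNat = n
  induction n generalizing x count res with
  | zero => unfold gpmLoopLow; rw [if_neg (by omega)]; have : x = 13 := by omega
            subst this; simp only [Prod.mk.injEq]; constructor <;> ring
  | succ k ih =>
      unfold gpmLoopLow; rw [if_pos (by omega)]
      rw [ih (x + 1) _ _ (by omega) (by omega)]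
      simp only [Prod.mk.injEq]; constructor <;> ring

theorem gpm_fdiv_two (n : Int) : PySem.Int.floordiv (2 * n) 2 = n := by
  rw [PySem.Int.floordiv_eq_ediv_of_pos (by omega)]
  omega

theorem game_pos_map_spec : Claim_equal_game_pos_map := by
  intro x y _
  unfold Spec_game_pos_map game_pos_map game_pos_map_alt
  by_cases hx : x ≥ 14
  · rw [if_pos hx, if_pos hx, gpmLoopHigh_eq x 28 0 hx]
    rw [show (28 : Int) - (28 - 2 * (x - 14), 0 + (x - 14) * 28 - (x - 14) * (x - 15)).1
          = 2 * (x - 14) from by ring, gpm_fdiv_two]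
    ring
  · rw [if_neg hx, if_neg hx, gpmLoopLow_eq x 28 0 (by omega)]
    rw [show (28 : Int) - (28 - 2 * (13 - x), 0 + (13 - x) * 28 - (13 - x) * (12 - x)).1
          = 2 * (13 - x) from by ring, gpm_fdiv_two]
    ring
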